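-- pv_equiv track=rewrite | github.com/aoloe/scribus-script-repository | imposition/sla-to-pdf.py | get_booklet_order
-- ===== SOURCE A (Python) =====
-- import itertools
--
-- def get_booklet_order(page_count):
--     if page_count % 4 != 0:
--         return []
--
--     numbering = []
--
--     sheet_count = page_count // 4
--
--     j = 1
--     for i in range(sheet_count):
--         numbering.append([page_count - j + 1, j, j + 1, page_count - j])
--         j += 2
--
--     numbering = list(itertools.chain(*numbering))
--     # numbering = [j for i in numbering for j in i]
--
--     return numbering
-- ===== SOURCE B (Python) =====
-- def get_booklet_order(page_count):
--     if page_count % 4 != 0: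
--         return []
--     out = []
--     for p in range(page_count):
--         i, r = divmod(p, 4)
--         if r == 0:
--             out.append(page_count - 2 * i)
--         elif r == 1:
--             out.append(2 * i + 1)
--         elif r == 2:
--             out.append(2 * i + 2)
--         else:
--             out.append(page_count - 2 * i - 1)
--     return out
-- ===== Notes on version B (the rewrite author's own statement) =====
-- stated objective: simpler
-- what changed: Single flat pass over output positions computing each entry directly from the position's quotient and remainder modulo four, instead of building a list of four-element sheets with a stepping counter and flattening it with itertools.chain.
import Mathlib
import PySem

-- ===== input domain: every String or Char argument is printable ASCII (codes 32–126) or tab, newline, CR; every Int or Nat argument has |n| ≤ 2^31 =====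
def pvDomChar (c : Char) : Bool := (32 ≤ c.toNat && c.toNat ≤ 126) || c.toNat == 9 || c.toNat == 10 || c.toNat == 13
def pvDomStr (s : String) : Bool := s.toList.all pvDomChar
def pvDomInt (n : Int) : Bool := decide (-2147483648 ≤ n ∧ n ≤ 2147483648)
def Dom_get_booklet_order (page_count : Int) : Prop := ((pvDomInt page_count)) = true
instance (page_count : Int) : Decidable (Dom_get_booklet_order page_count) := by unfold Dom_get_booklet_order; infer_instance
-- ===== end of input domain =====

-- B replaces A's two-stage build-of-sheets-then-chain-flatten by one flat pass over output
-- positions, computing each entry from the position's quotient and remainder modulo four; same cost, simpler structure.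

-- ===== PORT A =====
def get_booklet_order (page_count : Int) : List Int :=
  if PySem.Int.mod page_count 4 ≠ 0 then []
  else
    let sheet_count := PySem.Int.floordiv page_count 4
    let st := (PySem.List.pyRange 0 sheet_count 1).foldl
      (fun (acc : List (List Int) × Int) _ =>
        (acc.1 ++ [[page_count - acc.2 + 1, acc.2, acc.2 + 1, page_count - acc.2]], acc.2 + 2))
      ([], 1)
    st.1.flatten

-- ===== PORT B =====
def get_booklet_order_alt (page_count : Int) : List Int :=
  if PySem.Int.mod page_count 4 ≠ 0 then []
  else
    (PySem.List.pyRange 0 page_count 1).map (fun p =>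
      let i := PySem.Int.floordiv p 4
      let r := PySem.Int.mod p 4
      if r = 0 then page_count - 2 * i
      else if r = 1 then 2 * i + 1
      else if r = 2 then 2 * i + 2
      else page_count - 2 * i - 1)

-- ===== PRECONDITION & SPEC =====
def Spec_get_booklet_order (page_count : Int) (out : List Int) : Prop := out = get_booklet_order_alt page_count
instance (page_count : Int) (out : List Int) : Decidable (Spec_get_booklet_order page_count out) := by unfold Spec_get_booklet_order; infer_instance

-- ===== CLAIM (what is proved, stated in full; the proofs are below) =====
def Claim_equal_get_booklet_order : Prop := ∀ (page_count : Int), Dom_get_booklet_order page_count → Spec_get_booklet_order page_count (get_booklet_order page_count)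

-- ===== LEMMAS AND PROOFS =====

-- state of A's loop after k iterations
theorem a_fold_state (n : Int) (k : Nat) :
    (PySem.List.pyRange 0 (k : Int) 1).foldl
      (fun (acc : List (List Int) × Int) _ =>
        (acc.1 ++ [[n - acc.2 + 1, acc.2, acc.2 + 1, n - acc.2]], acc.2 + 2))
      ([], 1)
    = ((List.range k).map (fun i : Nat => [n - 2 * (i : Int), 2 * (i : Int) + 1, 2 * (i : Int) + 2, n - 2 * (i : Int) - 1]),
       (2 * (k : Int) + 1)) := by
  induction k with
  | zero => simp
  | succ k ih =>
    rw [show ((k + 1 : Nat) : Int) = (k : Int) + 1 by omega,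
        PySem.List.pyRange_one_succ_right (by positivity), List.foldl_append, ih]
    simp only [List.foldl_cons, List.foldl_nil, List.range_succ, List.map_append, List.map_cons,
      List.map_nil, Prod.mk.injEq]
    refine ⟨?_, by omega⟩
    congr 2
    simp only [List.cons.injEq, and_true]
    exact ⟨by ring, trivial, by ring, by ring⟩

theorem b_map (n : Int) (k : Nat) :
    (PySem.List.pyRange 0 (4 * (k : Int)) 1).map (fun p =>
      let i := PySem.Int.floordiv p 4
      let r := PySem.Int.mod p 4
      if r = 0 then n - 2 * i
      else if r = 1 then 2 * i + 1
      else if r = 2 then 2 * i + 2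
      else n - 2 * i - 1)
    = (List.range k).flatMap (fun i : Nat => [n - 2 * (i : Int), 2 * (i : Int) + 1, 2 * (i : Int) + 2, n - 2 * (i : Int) - 1]) := by
  induction k with
  | zero => simp
  | succ k ih =>
    have hsplit : PySem.List.pyRange 0 (4 * ((k + 1 : Nat) : Int)) 1
        = PySem.List.pyRange 0 (4 * (k : Int)) 1 ++ PySem.List.pyRange (4 * k) (4 * k + 4) 1 := by
      rw [show (4 * ((k + 1 : Nat) : Int)) = 4 * (k : Int) + 4 by push_cast; ring]
      exact PySem.List.pyRange_one_append 0 (4 * (k : Int)) _ (by positivity) (by omega)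
    have htail : PySem.List.pyRange (4 * (k : Int)) (4 * (k : Int) + 4) 1
        = ([4 * (k : Int), 4 * (k : Int) + 1, 4 * (k : Int) + 2, 4 * (k : Int) + 3] : List Int) := by
      rw [PySem.List.pyRange_one_cons (by omega), PySem.List.pyRange_one_cons (by omega),
          PySem.List.pyRange_one_cons (by omega), PySem.List.pyRange_one_cons (by omega),
          PySem.List.pyRange_one_eq_nil (by omega)]
      simp only [List.cons.injEq, and_true]
      exact ⟨trivial, trivial, by ring, by ring⟩
    rw [hsplit, List.map_append, ih, htail, List.range_succ, List.flatMap_append]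
    congr 1
    simp
    omega

-- ===== VERDICT (by name: the statement is the Claim_ definition above) =====
theorem get_booklet_order_spec : Claim_equal_get_booklet_order := by
  intro n _
  unfold Spec_get_booklet_order get_booklet_order get_booklet_order_alt
  by_cases hm : PySem.Int.mod n 4 = 0
  · rw [if_neg (not_not_intro hm), if_neg (not_not_intro hm)]
    simp only []
    have hdm := PySem.Int.floordiv_mul_add_mod n 4
    rw [hm, add_zero] at hdm
    set q := PySem.Int.floordiv n 4 with hq
    by_cases hpos : 0 < q
    · obtain ⟨k, hk⟩ : ∃ k : Nat, q = (k : Int) := ⟨q.toNat, by omega⟩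
      have hn : n = 4 * (k : Int) := by omega
      rw [hk, a_fold_state, hn, b_map]
      simp [List.flatMap]
    · have hq0 : PySem.List.pyRange 0 q 1 = [] := PySem.List.pyRange_one_eq_nil (by omega)
      have hn0 : PySem.List.pyRange 0 n 1 = [] := PySem.List.pyRange_one_eq_nil (by omega)
      rw [hq0, hn0]; simp
  · rw [if_pos hm, if_pos hm]
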